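-- pv_equiv track=rewrite | github.com/Javierg720/gemma-remember-rag | src/rag_engine.py | _simple_response
-- ===== SOURCE A (Python) =====
-- def _simple_response(prompt: str) -> str:
--     """
--     Fallback when no LLM is loaded — extract key info from retrieved context.
--     Good enough for demos and low-resource devices.
--     """
--     lines = prompt.split("\n")
--     name = ""
--     relationship = ""
--     caption = ""
--     story = ""
--     has_audio = False
--
--     for line in lines:
--         line = line.strip()
--         if line.startswith("Name:"):
--             name = line.split(":", 1)[1].strip()
--         elif line.startswith("Relationship:"):
--             relationship = line.split(":", 1)[1].strip()
--         elif line.startswith("Caption:"):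
--             caption = line.split(":", 1)[1].strip()
--         elif line.startswith("Story:"):
--             story = line.split(":", 1)[1].strip()
--         elif line.startswith("Audio clip: Available"):
--             has_audio = True
--
--     if not name or name == "Unknown":
--         return (
--             "I'm not sure who this is. "
--             "Would you like to tell me about them so I can remember for next time?"
--         )
--
--     parts = [f"This is {name}"]
--     if relationship:
--         parts[0] += f", your {relationship}"
--     parts[0] += "."
--
--     if caption and caption != "No caption":
--         parts.append(caption)
--     if story and story != "No story available":
--         parts.append(story)
--     if has_audio:
--         parts.append(f"I also have a voice clip of {name} — would you like to hear it?")
--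
--     return " ".join(parts)
-- ===== SOURCE B (Python) =====
-- def _simple_response(prompt: str) -> str:
--     # Generic parse: every 'key:value' line goes into one dict (last wins),
--     # then thefields are read back by lookup.
--     fields = {}
--     has_audio = False
--     for raw in prompt.split("\n"):
--         parts = raw.strip().split(":", 1)
--         if len(parts) == 2:
--             key, val = parts
--             fields[key] = val
--             if key == "Audio clip" and val.startswith(" Available"):
--                 has_audio = True
--     name = fields.get("Name", "").strip()
--     relationship = fields.get("Relationship", "").strip()
--     caption = fields.get("Caption", "").strip()
--     story = fields.get("Story", "").strip()
--
--     if not name or name == "Unknown":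
--         return (
--             "I'm not sure who this is. "
--             "Would you like to tell me about them so I can remember for next time?"
--         )
--
--     response = f"This is {name}"
--     if relationship:
--         response += f", your {relationship}"
--     response += "."
--     if caption and caption != "No caption":
--         response += f" {caption}"
--     if story and story != "No story available":
--         response += f" {story}"
--     if has_audio:
--         response += f" I also have a voice clip of {name} — would you like to hear it?"
--     return response
-- ===== Notes on version B (the rewrite author's own statement) =====
-- stated objective: idiomatic
-- what changed: B replaces A's five-way startswith/elif field-by-field branching with a single generic pass that splits each colon-containing line at its first colon into a dict (last occurrence wins, audio flag sticky) and then reads the four fields back via fields.get with a default, building the response by string accumulation instead of a parts list joined at the end.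
import Mathlib
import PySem

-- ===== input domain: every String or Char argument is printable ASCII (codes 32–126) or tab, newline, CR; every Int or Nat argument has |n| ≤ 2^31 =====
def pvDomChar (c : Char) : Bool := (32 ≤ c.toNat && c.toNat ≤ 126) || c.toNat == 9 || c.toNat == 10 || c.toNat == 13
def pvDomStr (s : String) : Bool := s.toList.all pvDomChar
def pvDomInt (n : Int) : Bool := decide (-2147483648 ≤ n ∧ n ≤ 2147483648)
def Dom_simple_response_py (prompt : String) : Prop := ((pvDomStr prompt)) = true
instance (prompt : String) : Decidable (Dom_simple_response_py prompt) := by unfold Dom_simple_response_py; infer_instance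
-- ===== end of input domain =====

-- B parses every "key:value" line of the prompt into one dict (instead of A's five-way
-- startswith/elif branching) and builds the response by string accumulation; same values, idiomatic restructuring.

-- ===== PORT A =====
-- loop body of A's for-line loop: state = (name, relationship, caption, story, has_audio)
def pvStepA (st : List Char × List Char × List Char × List Char × Bool) (line0 : List Char) :
    List Char × List Char × List Char × List Char × Bool :=
  let line := PySem.Chars.strip line0
  if PySem.Chars.startswith line "Name:".toList then
    (PySem.Chars.strip (PySem.List.pyGetD (PySem.Chars.splitOnMax line [':'] 1) 1 []),
     st.2.1, st.2.2.1, st.2.2.2.1, st.2.2.2.2)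
  else if PySem.Chars.startswith line "Relationship:".toList then
    (st.1, PySem.Chars.strip (PySem.List.pyGetD (PySem.Chars.splitOnMax line [':'] 1) 1 []),
     st.2.2.1, st.2.2.2.1, st.2.2.2.2)
  else if PySem.Chars.startswith line "Caption:".toList then
    (st.1, st.2.1, PySem.Chars.strip (PySem.List.pyGetD (PySem.Chars.splitOnMax line [':'] 1) 1 []),
     st.2.2.2.1, st.2.2.2.2)
  else if PySem.Chars.startswith line "Story:".toList then
    (st.1, st.2.1, st.2.2.1, PySem.Chars.strip (PySem.List.pyGetD (PySem.Chars.splitOnMax line [':'] 1) 1 []),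
     st.2.2.2.2)
  else if PySem.Chars.startswith line "Audio clip: Available".toList then
    (st.1, st.2.1, st.2.2.1, st.2.2.2.1, true)
  else st

-- response-building tail of A (parts list joined with " ")
def pvTailA (st : List Char × List Char × List Char × List Char × Bool) : String :=
  let name := st.1
  if name = [] ∨ name = "Unknown".toList then
    String.ofList "I'm not sure who this is. Would you like to tell me about them so I can remember for next time?".toList
  else
    let p0 := "This is ".toList ++ name
    let p0 := if st.2.1 ≠ [] then p0 ++ ", your ".toList ++ st.2.1 else p0
    let p0 := p0 ++ ".".toList
    let parts := [p0]
    let parts := if st.2.2.1 ≠ [] ∧ st.2.2.1 ≠ "No caption".toList then parts ++ [st.2.2.1] else parts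
    let parts := if st.2.2.2.1 ≠ [] ∧ st.2.2.2.1 ≠ "No story available".toList then parts ++ [st.2.2.2.1] else parts
    let parts := if st.2.2.2.2 then
        parts ++ ["I also have a voice clip of ".toList ++ name ++ " — would you like to hear it?".toList]
      else parts
    String.ofList (PySem.Chars.join " ".toList parts)

def simple_response_py (prompt : String) : String :=
  pvTailA ((PySem.Chars.splitOn prompt.toList ['\n']).foldl pvStepA ([], [], [], [], false))

-- ===== PORT B =====
-- loop body of B's single parsing pass: state = (fields dict, has_audio)
def pvStepB (st : PySem.Dict (List Char) (List Char) × Bool) (raw : List Char) :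
    PySem.Dict (List Char) (List Char) × Bool :=
  match PySem.Chars.splitOnMax (PySem.Chars.strip raw) [':'] 1 with
  | [key, val] =>
      (st.1.insert key val,
       if key = "Audio clip".toList ∧ PySem.Chars.startswith val " Available".toList then true else st.2)
  | _ => st

-- lookup phase + response accumulation of B
def pvTailB (st : PySem.Dict (List Char) (List Char) × Bool) : String :=
  let name := PySem.Chars.strip (st.1.getD "Name".toList [])
  let relationship := PySem.Chars.strip (st.1.getD "Relationship".toList [])
  let caption := PySem.Chars.strip (st.1.getD "Caption".toList [])
  let story := PySem.Chars.strip (st.1.getD "Story".toList [])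
  if name = [] ∨ name = "Unknown".toList then
    String.ofList "I'm not sure who this is. Would you like to tell me about them so I can remember for next time?".toList
  else
    let r := "This is ".toList ++ name
    let r := if relationship ≠ [] then r ++ (", your ".toList ++ relationship) else r
    let r := r ++ ".".toList
    let r := if caption ≠ [] ∧ caption ≠ "No caption".toList then r ++ (" ".toList ++ caption) else r
    let r := if story ≠ [] ∧ story ≠ "No story available".toList then r ++ (" ".toList ++ story) else r
    let r := if st.2 then
        r ++ (" I also have a voice clip of ".toList ++ name ++ " — would you like to hear it?".toList)
      else r
    String.ofList r

def simple_response_py_alt (prompt : String) : String :=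
  pvTailB ((PySem.Chars.splitOn prompt.toList ['\n']).foldl pvStepB (PySem.Dict.mk [], false))

-- ===== PRECONDITION & SPEC =====
def Spec_simple_response_py (prompt : String) (out : String) : Prop := out = simple_response_py_alt prompt
instance (prompt : String) (out : String) : Decidable (Spec_simple_response_py prompt out) := by unfold Spec_simple_response_py; infer_instance

-- ===== CLAIM (what is proved, stated in full; the proofs are below) =====
def Claim_equal_simple_response_py : Prop := ∀ (prompt : String), Dom_simple_response_py prompt → Spec_simple_response_py prompt (simple_response_py prompt)

-- ===== LEMMAS AND PROOFS =====

-- relation between A's five-field loop state and B's (dict, flag) state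
def pvR (sA : List Char × List Char × List Char × List Char × Bool)
    (sB : PySem.Dict (List Char) (List Char) × Bool) : Prop :=
  sA.1 = PySem.Chars.strip (sB.1.getD "Name".toList []) ∧
  sA.2.1 = PySem.Chars.strip (sB.1.getD "Relationship".toList []) ∧
  sA.2.2.1 = PySem.Chars.strip (sB.1.getD "Caption".toList []) ∧
  sA.2.2.2.1 = PySem.Chars.strip (sB.1.getD "Story".toList []) ∧
  sA.2.2.2.2 = sB.2

lemma pv_go_m0 (v cur : List Char) (acc : List (List Char)) (fuel : Nat) (hf : fuel ≠ 0) :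
    PySem.Chars.splitOnMax.go [':'] fuel 0 v cur acc = acc.reverse ++ [cur.reverse ++ v] := by
  obtain ⟨f, rfl⟩ : ∃ f, fuel = f + 1 := ⟨fuel - 1, by omega⟩
  cases v <;> simp [PySem.Chars.splitOnMax.go]


lemma pv_go_no_sep (l cur : List Char) (acc : List (List Char)) (fuel m : Nat)
    (hl : ':' ∉ l) (hf : l.length < fuel) :
    PySem.Chars.splitOnMax.go [':'] fuel m l cur acc = acc.reverse ++ [cur.reverse ++ l] := by
  induction l generalizing cur fuel with
  | nil =>
    obtain ⟨f, rfl⟩ : ∃ f, fuel = f + 1 := ⟨fuel - 1, by omega⟩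
    simp [PySem.Chars.splitOnMax.go]
  | cons c rest ih =>
    obtain ⟨f, rfl⟩ : ∃ f, fuel = f + 1 := ⟨fuel - 1, by omega⟩
    simp only [List.mem_cons, not_or] at hl
    have hc : ¬ (c = ':') := fun h => hl.1 (h ▸ rfl)
    have hpre : [':'].isPrefixOf (c :: rest) = false := by
      simp [List.isPrefixOf]
      intro h; exact absurd h.symm hc
    by_cases hm : m = 0
    · subst hm; simp [PySem.Chars.splitOnMax.go]
    · rw [PySem.Chars.splitOnMax.go.eq_def]
      simp only [hm, if_false, hpre, Bool.false_eq_true]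
      rw [ih _ _ hl.2 (by simp at hf ⊢; omega)]
      simp


lemma pv_go_sep (k v cur : List Char) (acc : List (List Char)) (fuel : Nat)
    (hk : ':' ∉ k) (hf : k.length + 1 ≤ fuel) :
    PySem.Chars.splitOnMax.go [':'] fuel 1 (k ++ ':' :: v) cur acc =
      acc.reverse ++ [cur.reverse ++ k, v] := by
  induction k generalizing cur fuel with
  | nil =>
    obtain ⟨f, rfl⟩ : ∃ f, fuel = f + 1 := ⟨fuel - 1, by omega⟩
    rw [PySem.Chars.splitOnMax.go.eq_def]
    have hpre : [':'].isPrefixOf (':' :: v) = true := by simp [List.isPrefixOf]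
    simp only [List.nil_append, hpre, if_true, Nat.succ_ne_zero]
    by_cases hf0 : f = 0
    · subst hf0
      cases v <;> simp [PySem.Chars.splitOnMax.go]
    · rw [show ((1:Nat) - 1) = 0 from rfl]
      simp only [List.length_cons, List.drop_succ_cons, List.drop_zero]
      rw [pv_go_m0 _ _ _ _ hf0]
      simp
  | cons c k' ih =>
    obtain ⟨f, rfl⟩ : ∃ f, fuel = f + 1 := ⟨fuel - 1, by omega⟩
    simp only [List.mem_cons, not_or] at hk
    have hc : ¬ (c = ':') := fun h => hk.1 (h ▸ rfl)
    have hpre : [':'].isPrefixOf (c :: (k' ++ ':' :: v)) = false := by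
      simp [List.isPrefixOf]
      intro h; exact absurd h.symm hc
    rw [List.cons_append, PySem.Chars.splitOnMax.go.eq_def]
    simp only [hpre, Bool.false_eq_true, if_false, Nat.succ_ne_zero]
    rw [ih _ _ hk.2 (by simp at hf ⊢; omega)]
    simp


lemma pv_split_no (t : List Char) (h : ':' ∉ t) :
    PySem.Chars.splitOnMax t [':'] 1 = [t] := by
  unfold PySem.Chars.splitOnMax
  rw [if_neg (by norm_num)]
  rw [pv_go_no_sep _ _ _ _ _ h (by omega)]
  simp


lemma pv_split_yes (k v : List Char) (hk : ':' ∉ k) :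
    PySem.Chars.splitOnMax (k ++ ':' :: v) [':'] 1 = [k, v] := by
  unfold PySem.Chars.splitOnMax
  rw [if_neg (by norm_num)]
  rw [show (Int.toNat 1) = 1 from rfl, pv_go_sep _ _ _ _ _ hk (by simp)]
  simp


lemma pv_decomp (t : List Char) : (':' ∉ t) ∨ ∃ k v, ':' ∉ k ∧ t = k ++ ':' :: v := by
  induction t with
  | nil => left; simp
  | cons c rest ih =>
    by_cases hc : c = ':'
    · right; exact ⟨[], rest, by simp, by simp [hc]⟩
    · rcases ih with h | ⟨k, v, hk, rfl⟩
      · left; simp [h]; exact fun he => hc he.symm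
      · right
        exact ⟨c :: k, v, by simp [hk]; exact fun he => hc he.symm, rfl⟩


lemma pv_prefix_iff (c : Char) (p s q v : List Char) (hp : c ∉ p) (hq : c ∉ q) :
    (p ++ c :: s <+: q ++ c :: v) ↔ p = q ∧ s <+: v := by
  induction p generalizing q with
  | nil =>
    cases q with
    | nil => simp [List.cons_prefix_cons]
    | cons b q' =>
      simp only [List.mem_cons, not_or] at hq
      simp [List.cons_prefix_cons]
      intro h; exact absurd h.symm (fun he => hq.1 he.symm)
  | cons a p' ih =>
    simp only [List.mem_cons, not_or] at hp
    cases q with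
    | nil =>
      simp [List.cons_prefix_cons]
      intro h; exact absurd h (fun he => hp.1 he.symm)
    | cons b q' =>
      simp only [List.mem_cons, not_or] at hq
      simp [List.cons_prefix_cons]
      rw [ih _ hp.2 hq.2, and_assoc]


lemma pv_step (sA : List Char × List Char × List Char × List Char × Bool)
    (sB : PySem.Dict (List Char) (List Char) × Bool) (l : List Char) (h : pvR sA sB) :
    pvR (pvStepA sA l) (pvStepB sB l) := by
  obtain ⟨h1, h2, h3, h4, h5⟩ := h
  rcases pv_decomp (PySem.Chars.strip l) with hno | ⟨k, v, hk, hu⟩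
  · have hf : ∀ pref : List Char, ':' ∈ pref → PySem.Chars.startswith (PySem.Chars.strip l) pref = false := by
      intro pref hc
      rw [← Bool.not_eq_true, PySem.Chars.startswith_iff]
      exact fun hpre => hno (hpre.subset hc)
    simp only [pvStepA, pvStepB, pv_split_no _ hno,
      hf "Name:".toList (by decide), hf "Relationship:".toList (by decide),
      hf "Caption:".toList (by decide), hf "Story:".toList (by decide),
      hf "Audio clip: Available".toList (by decide), Bool.false_eq_true, if_false]
    exact ⟨h1, h2, h3, h4, h5⟩
  · have hswT : ∀ (key s : List Char), ':' ∉ key →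
        (PySem.Chars.startswith (k ++ ':' :: v) (key ++ ':' :: s) = true ↔ key = k ∧ s <+: v) := by
      intro key s hkey
      rw [PySem.Chars.startswith_iff]
      exact pv_prefix_iff ':' key s k v hkey hk
    have hsw : ∀ (key s : List Char), ':' ∉ key →
        PySem.Chars.startswith (k ++ ':' :: v) (key ++ ':' :: s) = decide (key = k ∧ s <+: v) := by
      intro key s hkey
      by_cases hc : key = k ∧ s <+: v
      · obtain ⟨rfl, hps⟩ := hc
        simp only [hps, and_true]
        rw [(hswT key s hkey).mpr ⟨rfl, hps⟩]
        simp
      · simp only [hc, decide_false]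
        rw [← Bool.not_eq_true]
        exact fun ht => hc ((hswT key s hkey).mp ht)
    simp only [pvStepA, pvStepB, hu, pv_split_yes _ _ hk,
      show "Name:".toList = "Name".toList ++ ':' :: [] from rfl,
      show "Relationship:".toList = "Relationship".toList ++ ':' :: [] from rfl,
      show "Caption:".toList = "Caption".toList ++ ':' :: [] from rfl,
      show "Story:".toList = "Story".toList ++ ':' :: [] from rfl,
      show "Audio clip: Available".toList = "Audio clip".toList ++ ':' :: " Available".toList from rfl,
      hsw "Name".toList [] (by decide), hsw "Relationship".toList [] (by decide),
      hsw "Caption".toList [] (by decide), hsw "Story".toList [] (by decide),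
      hsw "Audio clip".toList " Available".toList (by decide)]
    have hget : PySem.List.pyGetD [k, v] 1 ([] : List Char) = v := by
      simp [PySem.List.pyGetD]
    simp only [List.nil_prefix, and_true, hget]
    by_cases e1 : "Name".toList = k
    · subst e1
      simp only [pvR, PySem.Dict.getD_insert, if_false, eq_self_iff_true, if_true,
  eq_false (by decide : ¬("Name".toList = "Relationship".toList)),
  eq_false (by decide : ¬("Name".toList = "Caption".toList)),
  eq_false (by decide : ¬("Name".toList = "Story".toList)),
  eq_false (by decide : ¬("Name".toList = "Audio clip".toList)),
  eq_false (by decide : ¬("Relationship".toList = "Name".toList)),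
  eq_false (by decide : ¬("Relationship".toList = "Caption".toList)),
  eq_false (by decide : ¬("Relationship".toList = "Story".toList)),
  eq_false (by decide : ¬("Relationship".toList = "Audio clip".toList)),
  eq_false (by decide : ¬("Caption".toList = "Name".toList)),
  eq_false (by decide : ¬("Caption".toList = "Relationship".toList)),
  eq_false (by decide : ¬("Caption".toList = "Story".toList)),
  eq_false (by decide : ¬("Caption".toList = "Audio clip".toList)),
  eq_false (by decide : ¬("Story".toList = "Name".toList)),
  eq_false (by decide : ¬("Story".toList = "Relationship".toList)),
  eq_false (by decide : ¬("Story".toList = "Caption".toList)),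
  eq_false (by decide : ¬("Story".toList = "Audio clip".toList)),
  eq_false (by decide : ¬("Audio clip".toList = "Name".toList)),
  eq_false (by decide : ¬("Audio clip".toList = "Relationship".toList)),
  eq_false (by decide : ¬("Audio clip".toList = "Caption".toList)),
  eq_false (by decide : ¬("Audio clip".toList = "Story".toList))]
      norm_num
      exact ⟨h2, h3, h4, h5⟩
    · by_cases e2 : "Relationship".toList = k
      · subst e2
        simp only [pvR, PySem.Dict.getD_insert, if_false, eq_self_iff_true, if_true,
  eq_false (by decide : ¬("Name".toList = "Relationship".toList)),
  eq_false (by decide : ¬("Name".toList = "Caption".toList)),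
  eq_false (by decide : ¬("Name".toList = "Story".toList)),
  eq_false (by decide : ¬("Name".toList = "Audio clip".toList)),
  eq_false (by decide : ¬("Relationship".toList = "Name".toList)),
  eq_false (by decide : ¬("Relationship".toList = "Caption".toList)),
  eq_false (by decide : ¬("Relationship".toList = "Story".toList)),
  eq_false (by decide : ¬("Relationship".toList = "Audio clip".toList)),
  eq_false (by decide : ¬("Caption".toList = "Name".toList)),
  eq_false (by decide : ¬("Caption".toList = "Relationship".toList)),
  eq_false (by decide : ¬("Caption".toList = "Story".toList)),
  eq_false (by decide : ¬("Caption".toList = "Audio clip".toList)),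
  eq_false (by decide : ¬("Story".toList = "Name".toList)),
  eq_false (by decide : ¬("Story".toList = "Relationship".toList)),
  eq_false (by decide : ¬("Story".toList = "Caption".toList)),
  eq_false (by decide : ¬("Story".toList = "Audio clip".toList)),
  eq_false (by decide : ¬("Audio clip".toList = "Name".toList)),
  eq_false (by decide : ¬("Audio clip".toList = "Relationship".toList)),
  eq_false (by decide : ¬("Audio clip".toList = "Caption".toList)),
  eq_false (by decide : ¬("Audio clip".toList = "Story".toList))]
        norm_num
        exact ⟨h1, h3, h4, h5⟩
      · by_cases e3 : "Caption".toList = k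
        · subst e3
          simp only [pvR, PySem.Dict.getD_insert, if_false, eq_self_iff_true, if_true,
  eq_false (by decide : ¬("Name".toList = "Relationship".toList)),
  eq_false (by decide : ¬("Name".toList = "Caption".toList)),
  eq_false (by decide : ¬("Name".toList = "Story".toList)),
  eq_false (by decide : ¬("Name".toList = "Audio clip".toList)),
  eq_false (by decide : ¬("Relationship".toList = "Name".toList)),
  eq_false (by decide : ¬("Relationship".toList = "Caption".toList)),
  eq_false (by decide : ¬("Relationship".toList = "Story".toList)),
  eq_false (by decide : ¬("Relationship".toList = "Audio clip".toList)),
  eq_false (by decide : ¬("Caption".toList = "Name".toList)),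
  eq_false (by decide : ¬("Caption".toList = "Relationship".toList)),
  eq_false (by decide : ¬("Caption".toList = "Story".toList)),
  eq_false (by decide : ¬("Caption".toList = "Audio clip".toList)),
  eq_false (by decide : ¬("Story".toList = "Name".toList)),
  eq_false (by decide : ¬("Story".toList = "Relationship".toList)),
  eq_false (by decide : ¬("Story".toList = "Caption".toList)),
  eq_false (by decide : ¬("Story".toList = "Audio clip".toList)),
  eq_false (by decide : ¬("Audio clip".toList = "Name".toList)),
  eq_false (by decide : ¬("Audio clip".toList = "Relationship".toList)),
  eq_false (by decide : ¬("Audio clip".toList = "Caption".toList)),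
  eq_false (by decide : ¬("Audio clip".toList = "Story".toList))]
          norm_num
          exact ⟨h1, h2, h4, h5⟩
        · by_cases e4 : "Story".toList = k
          · subst e4
            simp only [pvR, PySem.Dict.getD_insert, if_false, eq_self_iff_true, if_true,
  eq_false (by decide : ¬("Name".toList = "Relationship".toList)),
  eq_false (by decide : ¬("Name".toList = "Caption".toList)),
  eq_false (by decide : ¬("Name".toList = "Story".toList)),
  eq_false (by decide : ¬("Name".toList = "Audio clip".toList)),
  eq_false (by decide : ¬("Relationship".toList = "Name".toList)),
  eq_false (by decide : ¬("Relationship".toList = "Caption".toList)),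
  eq_false (by decide : ¬("Relationship".toList = "Story".toList)),
  eq_false (by decide : ¬("Relationship".toList = "Audio clip".toList)),
  eq_false (by decide : ¬("Caption".toList = "Name".toList)),
  eq_false (by decide : ¬("Caption".toList = "Relationship".toList)),
  eq_false (by decide : ¬("Caption".toList = "Story".toList)),
  eq_false (by decide : ¬("Caption".toList = "Audio clip".toList)),
  eq_false (by decide : ¬("Story".toList = "Name".toList)),
  eq_false (by decide : ¬("Story".toList = "Relationship".toList)),
  eq_false (by decide : ¬("Story".toList = "Caption".toList)),
  eq_false (by decide : ¬("Story".toList = "Audio clip".toList)),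
  eq_false (by decide : ¬("Audio clip".toList = "Name".toList)),
  eq_false (by decide : ¬("Audio clip".toList = "Relationship".toList)),
  eq_false (by decide : ¬("Audio clip".toList = "Caption".toList)),
  eq_false (by decide : ¬("Audio clip".toList = "Story".toList))]
            norm_num
            exact ⟨h1, h2, h3, h5⟩
          · by_cases e5 : "Audio clip".toList = k
            · subst e5
              by_cases hav : " Available".toList <+: v
              · have hsv : PySem.Chars.startswith v " Available".toList = true :=
                  (PySem.Chars.startswith_iff v _).mpr hav
                simp only [pvR, PySem.Dict.getD_insert, hav, hsv, if_false, eq_self_iff_true, if_true,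
  eq_false (by decide : ¬("Name".toList = "Relationship".toList)),
  eq_false (by decide : ¬("Name".toList = "Caption".toList)),
  eq_false (by decide : ¬("Name".toList = "Story".toList)),
  eq_false (by decide : ¬("Name".toList = "Audio clip".toList)),
  eq_false (by decide : ¬("Relationship".toList = "Name".toList)),
  eq_false (by decide : ¬("Relationship".toList = "Caption".toList)),
  eq_false (by decide : ¬("Relationship".toList = "Story".toList)),
  eq_false (by decide : ¬("Relationship".toList = "Audio clip".toList)),
  eq_false (by decide : ¬("Caption".toList = "Name".toList)),
  eq_false (by decide : ¬("Caption".toList = "Relationship".toList)),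
  eq_false (by decide : ¬("Caption".toList = "Story".toList)),
  eq_false (by decide : ¬("Caption".toList = "Audio clip".toList)),
  eq_false (by decide : ¬("Story".toList = "Name".toList)),
  eq_false (by decide : ¬("Story".toList = "Relationship".toList)),
  eq_false (by decide : ¬("Story".toList = "Caption".toList)),
  eq_false (by decide : ¬("Story".toList = "Audio clip".toList)),
  eq_false (by decide : ¬("Audio clip".toList = "Name".toList)),
  eq_false (by decide : ¬("Audio clip".toList = "Relationship".toList)),
  eq_false (by decide : ¬("Audio clip".toList = "Caption".toList)),
  eq_false (by decide : ¬("Audio clip".toList = "Story".toList))]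
                norm_num
                exact ⟨h1, h2, h3, h4⟩
              · have hsv : PySem.Chars.startswith v " Available".toList = false := by
                  rw [← Bool.not_eq_true, PySem.Chars.startswith_iff]
                  exact hav
                simp only [pvR, PySem.Dict.getD_insert, hav, hsv, if_false, eq_self_iff_true, if_true,
  eq_false (by decide : ¬("Name".toList = "Relationship".toList)),
  eq_false (by decide : ¬("Name".toList = "Caption".toList)),
  eq_false (by decide : ¬("Name".toList = "Story".toList)),
  eq_false (by decide : ¬("Name".toList = "Audio clip".toList)),
  eq_false (by decide : ¬("Relationship".toList = "Name".toList)),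
  eq_false (by decide : ¬("Relationship".toList = "Caption".toList)),
  eq_false (by decide : ¬("Relationship".toList = "Story".toList)),
  eq_false (by decide : ¬("Relationship".toList = "Audio clip".toList)),
  eq_false (by decide : ¬("Caption".toList = "Name".toList)),
  eq_false (by decide : ¬("Caption".toList = "Relationship".toList)),
  eq_false (by decide : ¬("Caption".toList = "Story".toList)),
  eq_false (by decide : ¬("Caption".toList = "Audio clip".toList)),
  eq_false (by decide : ¬("Story".toList = "Name".toList)),
  eq_false (by decide : ¬("Story".toList = "Relationship".toList)),
  eq_false (by decide : ¬("Story".toList = "Caption".toList)),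
  eq_false (by decide : ¬("Story".toList = "Audio clip".toList)),
  eq_false (by decide : ¬("Audio clip".toList = "Name".toList)),
  eq_false (by decide : ¬("Audio clip".toList = "Relationship".toList)),
  eq_false (by decide : ¬("Audio clip".toList = "Caption".toList)),
  eq_false (by decide : ¬("Audio clip".toList = "Story".toList))]
                norm_num
                exact ⟨h1, h2, h3, h4, h5⟩
            · have e5' : ¬(k = "Audio clip".toList) := fun h => e5 h.symm
              simp only [pvR, PySem.Dict.getD_insert, e1, e2, e3, e4, e5, e5', decide_false,
                false_and, if_false, Bool.false_eq_true]
              norm_num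
              exact ⟨h1, h2, h3, h4, h5⟩


lemma pv_fold (lines : List (List Char)) (sA : List Char × List Char × List Char × List Char × Bool)
    (sB : PySem.Dict (List Char) (List Char) × Bool) (h : pvR sA sB) :
    pvR (lines.foldl pvStepA sA) (lines.foldl pvStepB sB) := by
  induction lines generalizing sA sB with
  | nil => exact h
  | cons x xs ih => exact ih _ _ (pv_step _ _ _ h)

lemma pv_tail (sA : List Char × List Char × List Char × List Char × Bool)
    (sB : PySem.Dict (List Char) (List Char) × Bool) (h : pvR sA sB) :
    pvTailA sA = pvTailB sB := by
  obtain ⟨h1, h2, h3, h4, h5⟩ := h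
  simp only [pvTailA, pvTailB]
  rw [← h1, ← h2, ← h3, ← h4, ← h5]
  by_cases hn : sA.1 = [] ∨ sA.1 = "Unknown".toList
  · rw [if_pos hn, if_pos hn]
  · rw [if_neg hn, if_neg hn]
    refine congrArg String.ofList ?_
    by_cases hc : sA.2.2.1 ≠ [] ∧ sA.2.2.1 ≠ "No caption".toList <;>
      by_cases hs : sA.2.2.2.1 ≠ [] ∧ sA.2.2.2.1 ≠ "No story available".toList <;>
      cases hA : sA.2.2.2.2 <;>
      simp only [ne_eq, hc, hs, hA, not_true, not_false_iff, if_true, if_false,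
        and_true, and_false, true_and, false_and, Bool.false_eq_true] <;>
      simp [PySem.Chars.join_singleton, PySem.Chars.join_cons_cons, List.append_assoc,
        show (" ".toList : List Char) ++ "I also have a voice clip of ".toList = " I also have a voice clip of ".toList from by decide]

-- ===== VERDICT (by name: the statement is the Claim_ definition above) =====
theorem simple_response_py_spec : Claim_equal_simple_response_py := by
  intro prompt _
  unfold Spec_simple_response_py simple_response_py simple_response_py_alt
  exact pv_tail _ _ (pv_fold _ _ _ (by unfold pvR; refine ⟨rfl, rfl, rfl, rfl, rfl⟩))
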